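-- pv_equiv track=rewrite | github.com/regisgambiza/mathmind | server-python/services/adaptive.py | _allocate_distribution
-- ===== SOURCE A (Python) =====
-- def _allocate_distribution(total_count, distribution_pct):
--     """Allocate question count based on difficulty distribution percentages."""
--     keys = ['foundation', 'core', 'advanced']
--     raw = [(k, distribution_pct.get(k, 0) * total_count / 100) for k in keys]
--
--     base = {}
--     assigned = 0
--
--     for key, value in raw:
--         base[key] = int(value)
--         assigned += base[key]
--
--     remainder = max(0, total_count - assigned)
--     raw.sort(key=lambda x: x[1] - int(x[1]), reverse=True)
--
--     idx = 0
--     while remainder > 0 and raw: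
--         key = raw[idx % len(raw)][0]
--         base[key] += 1
--         remainder -= 1
--         idx += 1
--
--     return base
-- ===== SOURCE B (Python) =====
-- def _allocate_distribution(total_count, distribution_pct):
--     """Allocate question count based on difficulty distribution percentages."""
--     keys = ['foundation', 'core', 'advanced']
--     raw = [(k, distribution_pct.get(k, 0) * total_count / 100) for k in keys]
--     base = {k: int(v) for k, v in raw}
--     remainder = max(0, total_count - sum(base.values()))
--     order = sorted(raw, key=lambda x: x[1] - int(x[1]), reverse=True)
--     q, r = divmod(remainder, len(order))
--     for i, (k, _) in enumerate(order):
--         base[k] += q + (1 if i < r else 0)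
--     return base
-- ===== Notes on version B (the rewrite author's own statement) =====
-- stated objective: faster
-- what changed: A hands out the remainder one question at a time in a while loop that cycles over the sorted tiers (remainder iterations); B computes q, r = divmod(remainder, 3) once and gives every tier q plus one extra to the first r tiers of the same stable fractional-part sort.
import Mathlib
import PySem

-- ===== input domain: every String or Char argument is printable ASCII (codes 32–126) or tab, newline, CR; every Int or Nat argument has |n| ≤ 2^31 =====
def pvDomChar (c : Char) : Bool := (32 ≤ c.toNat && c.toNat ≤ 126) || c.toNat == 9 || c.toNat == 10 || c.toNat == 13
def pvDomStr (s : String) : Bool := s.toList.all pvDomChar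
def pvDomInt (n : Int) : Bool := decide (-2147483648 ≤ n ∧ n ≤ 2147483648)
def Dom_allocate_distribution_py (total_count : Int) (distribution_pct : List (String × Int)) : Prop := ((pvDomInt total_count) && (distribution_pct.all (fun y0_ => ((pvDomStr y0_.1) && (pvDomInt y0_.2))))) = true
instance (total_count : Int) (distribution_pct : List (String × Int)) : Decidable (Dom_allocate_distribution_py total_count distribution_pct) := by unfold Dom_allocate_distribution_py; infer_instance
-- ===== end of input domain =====

-- B replaces A's one-increment-at-a-time while loop over the remainder by a single
-- divmod split (q to every tier, one extra to the first r sorted tiers).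
-- Shared primitive models (both Pythons perform the identical primitive operations):
-- pvFloatDiv100 models CPython's correctly-rounded int/int true division 'x / 100'
-- as an exact rational (round-to-nearest-even, 53-bit significand; exact on |x| ≤ 2^62,
-- no overflow/subnormals there), and pvTrunc models 'int(float)'; the float subtraction
-- 'v - int(v)' is exact for these doubles, so it is modelled by exact rational subtraction.

-- ===== PORT A =====
def pvRHE (num den : Int) : Int :=
  let q := PySem.Int.floordiv num den
  let r := PySem.Int.mod num den
  if 2 * r < den then q
  else if den < 2 * r then q + 1
  else if PySem.Int.mod q 2 = 0 then q else q + 1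

def pvFloatDiv100 (n : Int) : ℚ :=
  if n = 0 then 0
  else
    let a : Nat := n.natAbs
    let e2 : Nat := Nat.log2 (a * 128 / 100)
    let m : Int :=
      if 59 ≤ e2 then pvRHE (a : Int) (100 * 2 ^ (e2 - 59))
      else pvRHE ((a : Int) * 2 ^ (59 - e2)) 100
    let mag : ℚ := if 59 ≤ e2 then (m : ℚ) * 2 ^ (e2 - 59) else (m : ℚ) / 2 ^ (59 - e2)
    if n < 0 then -mag else mag

def pvTrunc (v : ℚ) : Int := if v < 0 then -(Rat.floor (-v)) else Rat.floor v

-- the identical comprehension line 'raw = [(k, distribution_pct.get(k, 0) * total_count / 100) for k in keys]'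
def pvRaw (total_count : Int) (distribution_pct : List (String × Int)) : List (String × ℚ) :=
  ["foundation", "core", "advanced"].map
    (fun k => (k, pvFloatDiv100 ((PySem.Dict.getD (PySem.Dict.mk distribution_pct) k 0) * total_count)))

-- 'while remainder > 0 and raw: base[raw[idx % len(raw)][0]] += 1; remainder -= 1; idx += 1'
def pvWhileA (raw : List (String × ℚ)) : Nat → Nat → PySem.Dict String Int → PySem.Dict String Int
  | 0, _, base => base
  | m + 1, idx, base =>
      if raw.length = 0 then base
      else
        pvWhileA raw m (idx + 1)
          (base.modify (PySem.List.pyGetD raw ((idx % raw.length : Nat) : Int) ("", 0)).1 0 (· + 1))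

def allocate_distribution_py (total_count : Int) (distribution_pct : List (String × Int)) : List (String × Int) :=
  let raw := pvRaw total_count distribution_pct
  let bs := raw.foldl
      (fun (p : PySem.Dict String Int × Int) kv => (p.1.insert kv.1 (pvTrunc kv.2), p.2 + pvTrunc kv.2))
      (PySem.Dict.empty, 0)
  let remainder : Int := max 0 (total_count - bs.2)
  let raws := PySem.List.sorted raw (fun x => x.2 - (pvTrunc x.2 : ℚ)) true
  (pvWhileA raws remainder.toNat 0 bs.1).items

-- ===== PORT B =====
def allocate_distribution_py_alt (total_count : Int) (distribution_pct : List (String × Int)) : List (String × Int) :=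
  let raw := pvRaw total_count distribution_pct
  let base := raw.foldl (fun b kv => b.insert kv.1 (pvTrunc kv.2)) PySem.Dict.empty
  let remainder : Int := max 0 (total_count - base.values.foldl (· + ·) 0)
  let order := PySem.List.sorted raw (fun x => x.2 - (pvTrunc x.2 : ℚ)) true
  let q := PySem.Int.floordiv remainder (order.length : Int)
  let r := PySem.Int.mod remainder (order.length : Int)
  ((PySem.List.enumerate order).foldl
      (fun b p => b.modify p.2.1 0 (· + (q + if p.1 < r then 1 else 0))) base).items

-- ===== PRECONDITION & SPEC =====
def Spec_allocate_distribution_py (total_count : Int) (distribution_pct : List (String × Int)) (out : List (String × Int)) : Prop := out = allocate_distribution_py_alt total_count distribution_pct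
instance (total_count : Int) (distribution_pct : List (String × Int)) (out : List (String × Int)) : Decidable (Spec_allocate_distribution_py total_count distribution_pct out) := by unfold Spec_allocate_distribution_py; infer_instance

-- ===== CLAIM (what is proved, stated in full; the proofs are below) =====
def Claim_equal_allocate_distribution_py : Prop := ∀ (total_count : Int) (distribution_pct : List (String × Int)), Dom_allocate_distribution_py total_count distribution_pct → Spec_allocate_distribution_py total_count distribution_pct (allocate_distribution_py total_count distribution_pct)

-- ===== LEMMAS AND PROOFS =====

-- the three-key dict every intermediate state of both loops has
def pvMk3 (x y z : Int) : PySem.Dict String Int :=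
  PySem.Dict.mk [("foundation", x), ("core", y), ("advanced", z)]

lemma pvModLem (k : String) (hk : k ∈ (["foundation", "core", "advanced"] : List String))
    (x y z δ : Int) :
    (pvMk3 x y z).modify k 0 (· + δ) =
      pvMk3 (x + if k = "foundation" then δ else 0)
            (y + if k = "core" then δ else 0)
            (z + if k = "advanced" then δ else 0) := by
  fin_cases hk <;>
    simp [pvMk3, PySem.Dict.modify, PySem.Dict.insert, PySem.Dict.contains,
      PySem.Dict.getD, PySem.Dict.get?, List.find?, List.any]

-- per-key step count of the while loop
def pvS (L : List (String × ℚ)) (K : String) (idx n : Nat) : Int :=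
  ∑ t ∈ Finset.range n, (if (L.getD ((idx + t) % 3) ("", 0)).1 = K then (1 : Int) else 0)

lemma pvS_succ (L : List (String × ℚ)) (K : String) (idx m : Nat) :
    pvS L K idx (m + 1) =
      (if (L.getD (idx % 3) ("", 0)).1 = K then (1 : Int) else 0) + pvS L K (idx + 1) m := by
  unfold pvS
  rw [Finset.sum_range_succ']
  simp only [Nat.add_zero]
  rw [add_comm]
  congr 1
  apply Finset.sum_congr rfl
  intro t _
  have h : idx + (t + 1) = (idx + 1) + t := by omega
  rw [h]

lemma pvWhileA_char (L : List (String × ℚ)) (hlen : L.length = 3)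
    (hk : ∀ j, j < 3 → (L.getD j ("", 0)).1 ∈ (["foundation", "core", "advanced"] : List String)) :
    ∀ (m idx : Nat) (x y z : Int),
      pvWhileA L m idx (pvMk3 x y z) =
        pvMk3 (x + pvS L "foundation" idx m) (y + pvS L "core" idx m) (z + pvS L "advanced" idx m) := by
  intro m
  induction m with
  | zero => intro idx x y z; simp [pvWhileA, pvS]
  | succ m ih =>
      intro idx x y z
      have h3 : ¬ L.length = 0 := by omega
      have hmod : idx % L.length < 3 := by rw [hlen]; omega
      rw [pvWhileA, if_neg h3]
      rw [PySem.List.pyGetD_natCast]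
      rw [hlen]
      rw [pvModLem _ (hk _ (by omega)) x y z 1]
      rw [ih]
      simp only [pvS_succ, add_assoc]

lemma pvCnt3 (p : Nat) (hp : p < 3) (n : Nat) :
    (∑ t ∈ Finset.range n, if t % 3 = p then (1 : Int) else 0) =
      ((n / 3 : Nat) : Int) + (if p < n % 3 then 1 else 0) := by
  induction n with
  | zero => simp
  | succ n ih =>
      rw [Finset.sum_range_succ, ih]
      split_ifs <;> push_cast <;> omega


lemma pvPull (K : String) (n : Nat) (sp : String × ℚ) (p : Nat) (hp : p < 3) :
    (∑ t ∈ Finset.range n, if sp.1 = K then (if t % 3 = p then (1 : Int) else 0) else 0)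
      = (if sp.1 = K then ((n / 3 : Nat) : Int) + (if p < n % 3 then 1 else 0) else 0) := by
  by_cases h : sp.1 = K
  · simp only [h, if_true]; exact pvCnt3 p hp n
  · simp [h]

lemma pvS_closed (s0 s1 s2 : String × ℚ) (K : String) (n : Nat) :
    pvS [s0, s1, s2] K 0 n =
      (if s0.1 = K then ((n / 3 : Nat) : Int) + (if 0 < n % 3 then 1 else 0) else 0)
      + (if s1.1 = K then ((n / 3 : Nat) : Int) + (if 1 < n % 3 then 1 else 0) else 0)
      + (if s2.1 = K then ((n / 3 : Nat) : Int) + (if 2 < n % 3 then 1 else 0) else 0) := by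
  unfold pvS
  have hsplit : ∀ t : Nat,
      (if (([s0, s1, s2] : List (String × ℚ)).getD ((0 + t) % 3) ("", 0)).1 = K then (1 : Int) else 0)
        = (if s0.1 = K then (if t % 3 = 0 then (1 : Int) else 0) else 0)
          + (if s1.1 = K then (if t % 3 = 1 then (1 : Int) else 0) else 0)
          + (if s2.1 = K then (if t % 3 = 2 then (1 : Int) else 0) else 0) := by
    intro t
    have h : t % 3 = 0 ∨ t % 3 = 1 ∨ t % 3 = 2 := by omega
    rcases h with h|h|h <;> simp [h]
  simp only [hsplit, Finset.sum_add_distrib]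
  rw [pvPull K n s0 0 (by omega), pvPull K n s1 1 (by omega), pvPull K n s2 2 (by omega)]

-- ===== VERDICT (by name: the statement is the Claim_ definition above) =====
theorem allocate_distribution_py_spec : Claim_equal_allocate_distribution_py := by
  intro t d _
  unfold Spec_allocate_distribution_py allocate_distribution_py allocate_distribution_py_alt
  set w0 : ℚ := pvFloatDiv100 ((PySem.Dict.getD (PySem.Dict.mk d) "foundation" 0) * t) with hw0
  set w1 : ℚ := pvFloatDiv100 ((PySem.Dict.getD (PySem.Dict.mk d) "core" 0) * t) with hw1
  set w2 : ℚ := pvFloatDiv100 ((PySem.Dict.getD (PySem.Dict.mk d) "advanced" 0) * t) with hw2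
  have hraw : pvRaw t d = [("foundation", w0), ("core", w1), ("advanced", w2)] := by
    simp [pvRaw, hw0, hw1, hw2]
  rw [hraw]
  clear hraw hw0 hw1 hw2
  clear_value w0 w1 w2
  dsimp only

  have hfold : ([("foundation", w0), ("core", w1), ("advanced", w2)] : List (String × ℚ)).foldl
      (fun (p : PySem.Dict String Int × Int) kv => (p.1.insert kv.1 (pvTrunc kv.2), p.2 + pvTrunc kv.2))
      (PySem.Dict.empty, 0)
      = (pvMk3 (pvTrunc w0) (pvTrunc w1) (pvTrunc w2), 0 + pvTrunc w0 + pvTrunc w1 + pvTrunc w2) := by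
    simp [pvMk3, PySem.Dict.insert, PySem.Dict.contains, PySem.Dict.empty]
  have hfoldB : ([("foundation", w0), ("core", w1), ("advanced", w2)] : List (String × ℚ)).foldl
      (fun (b : PySem.Dict String Int) kv => b.insert kv.1 (pvTrunc kv.2)) PySem.Dict.empty
      = pvMk3 (pvTrunc w0) (pvTrunc w1) (pvTrunc w2) := by
    simp [pvMk3, PySem.Dict.insert, PySem.Dict.contains, PySem.Dict.empty]
  rw [hfold, hfoldB]
  have hvals : (pvMk3 (pvTrunc w0) (pvTrunc w1) (pvTrunc w2)).values.foldl (· + ·) 0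
      = 0 + pvTrunc w0 + pvTrunc w1 + pvTrunc w2 := by
    simp [pvMk3, PySem.Dict.values]
  rw [hvals]
  set R : Int := max 0 (t - (0 + pvTrunc w0 + pvTrunc w1 + pvTrunc w2)) with hRdef
  have hR : (R.toNat : Int) = R := Int.toNat_of_nonneg (le_max_left _ _)
  set n : Nat := R.toNat with hndef
  set S := PySem.List.sorted ([("foundation", w0), ("core", w1), ("advanced", w2)] : List (String × ℚ))
      (fun x => x.2 - (pvTrunc x.2 : ℚ)) true with hSdef
  have hlenS : S.length = 3 := by rw [hSdef]; rw [PySem.List.length_sorted]; rfl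
  obtain ⟨s0, s1, s2, hS⟩ : ∃ s0 s1 s2, S = [s0, s1, s2] := by
    match S, hlenS with
    | [x, y, z], _ => exact ⟨x, y, z, rfl⟩
  have hmem : ∀ s ∈ ([s0, s1, s2] : List (String × ℚ)),
      s.1 ∈ (["foundation", "core", "advanced"] : List String) := by
    intro s hs
    have hx : s ∈ S := by rw [hS]; exact hs
    rw [hSdef, PySem.List.mem_sorted] at hx
    simp at hx
    rcases hx with h|h|h <;> simp [h]
  rw [hS]
  have hk' : ∀ j, j < 3 → (([s0, s1, s2] : List (String × ℚ)).getD j ("", 0)).1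
      ∈ (["foundation", "core", "advanced"] : List String) := by
    intro j hj
    interval_cases j
    · simpa using hmem s0 (by simp)
    · simpa using hmem s1 (by simp)
    · simpa using hmem s2 (by simp)
  rw [pvWhileA_char [s0, s1, s2] rfl hk' n 0]
  have henum : PySem.List.enumerate ([s0, s1, s2] : List (String × ℚ)) = [(0, s0), (1, s1), (2, s2)] := by
    simp [PySem.List.enumerate_cons, PySem.List.enumerate_nil]
  rw [henum]
  simp only [List.foldl_cons, List.foldl_nil, List.length_cons, List.length_nil]

  rw [← hR]
  have hq : PySem.Int.floordiv ((n : Nat) : Int) (3 : Int) = ((n / 3 : Nat) : Int) := by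
    exact_mod_cast PySem.Int.floordiv_natCast n 3
  have hr : PySem.Int.mod ((n : Nat) : Int) (3 : Int) = ((n % 3 : Nat) : Int) := by
    exact_mod_cast PySem.Int.mod_natCast n 3
  simp only [show ((0 + 1 + 1 + 1 : Nat)) = 3 from rfl, Nat.cast_ofNat, hq, hr]
  rw [pvModLem s0.1 (hmem s0 (by simp))]
  rw [pvModLem s1.1 (hmem s1 (by simp))]
  rw [pvModLem s2.1 (hmem s2 (by simp))]
  rw [pvS_closed, pvS_closed, pvS_closed]
  rcases (by omega : n % 3 = 0 ∨ n % 3 = 1 ∨ n % 3 = 2) with h3|h3|h3 <;>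
    rw [h3] <;> norm_num [pvMk3] <;> refine ⟨by ring, by ring, by ring⟩
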